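-- pv_equiv track=rewrite | github.com/haltmayermarc/Samsung_ICML | LOD.py | build_coarse_adjacency
-- ===== SOURCE A (Python) =====
-- def build_coarse_adjacency(coarse_elems):
--     """
--     Two elements are neighbors if they share at least one node.
--     """
--     node_to_elems = {}
--     for e, elem in enumerate(coarse_elems):
--         for n in elem:
--             node_to_elems.setdefault(n, []).append(e)
--
--     adjacency = [set() for _ in range(len(coarse_elems))]
--     for elems in node_to_elems.values():
--         for e in elems:
--             adjacency[e].update(elems)
--
--     # remove self
--     for e in range(len(adjacency)):
--         adjacency[e].discard(e)
--
--     return adjacency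
-- ===== SOURCE B (Python) =====
-- def build_coarse_adjacency(coarse_elems):
--     """
--     Two elements are neighbors if they share at least one node.
--     """
--     node_to_elems = {}
--     for e, elem in enumerate(coarse_elems):
--         for n in elem:
--             node_to_elems.setdefault(n, []).append(e)
--
--     return [{j for group in node_to_elems.values() if e in group for j in group} - {e}
--             for e in range(len(coarse_elems))]
-- ===== Notes on version B (the rewrite author's own statement) =====
-- stated objective: simpler
-- what changed: Keeps the node-to-elements index but replaces A's three mutation passes (preallocate rows, push every node's element group into each member row, then a discard-self pass) with a single pull-style comprehension that builds each row directly as the union of the groups containing it minus itself.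
import Mathlib
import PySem

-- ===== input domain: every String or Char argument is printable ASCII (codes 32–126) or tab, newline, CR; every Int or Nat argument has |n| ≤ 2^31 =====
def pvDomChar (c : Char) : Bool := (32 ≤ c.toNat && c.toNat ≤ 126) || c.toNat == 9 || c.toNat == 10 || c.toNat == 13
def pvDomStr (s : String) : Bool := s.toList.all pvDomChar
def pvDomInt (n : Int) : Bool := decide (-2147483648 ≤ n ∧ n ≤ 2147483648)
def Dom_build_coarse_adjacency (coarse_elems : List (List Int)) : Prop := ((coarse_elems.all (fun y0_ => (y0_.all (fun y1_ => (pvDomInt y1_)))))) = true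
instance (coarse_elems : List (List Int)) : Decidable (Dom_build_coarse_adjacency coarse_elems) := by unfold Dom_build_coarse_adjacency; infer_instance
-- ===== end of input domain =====

-- B keeps A's node→elements index but derives each adjacency row by a direct pull-style comprehension instead of A's push/mutate/discard passes (simpler decomposition, same results).


-- ===== PORT A =====
def build_coarse_adjacency (coarse_elems : List (List Int)) : List (List Int) :=
  -- node_to_elems = {}; for e, elem in enumerate(coarse_elems): for n in elem: node_to_elems.setdefault(n, []).append(e)
  let node_to_elems : PySem.Dict Int (List Int) :=
    (PySem.List.enumerate coarse_elems).foldl (fun d p =>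
      p.2.foldl (fun d n => PySem.Dict.modify d n [] (fun l => l ++ [p.1])) d) PySem.Dict.empty
  -- adjacency = [set() for _ in range(len(coarse_elems))]
  let adjacency : List (PySem.Set Int) :=
    (PySem.List.pyRange 0 (PySem.List.len coarse_elems) 1).map (fun _ => PySem.Set.empty)
  -- for elems in node_to_elems.values(): for e in elems: adjacency[e].update(elems)
  let adjacency :=
    node_to_elems.values.foldl (fun adj elems =>
      elems.foldl (fun adj e =>
        PySem.List.pySetD adj e
          (PySem.Set.update (PySem.List.pyGetD adj e PySem.Set.empty) elems)) adj) adjacency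
  -- for e in range(len(adjacency)): adjacency[e].discard(e)
  let adjacency :=
    (PySem.List.pyRange 0 (PySem.List.len adjacency) 1).foldl (fun adj e =>
      PySem.List.pySetD adj e
        (PySem.Set.discard (PySem.List.pyGetD adj e PySem.Set.empty) e)) adjacency
  adjacency

-- ===== PORT B =====
def build_coarse_adjacency_alt (coarse_elems : List (List Int)) : List (List Int) :=
  -- node_to_elems = {}; for e, elem in enumerate(coarse_elems): for n in elem: node_to_elems.setdefault(n, []).append(e)
  let node_to_elems : PySem.Dict Int (List Int) :=
    (PySem.List.enumerate coarse_elems).foldl (fun d p =>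
      p.2.foldl (fun d n => PySem.Dict.modify d n [] (fun l => l ++ [p.1])) d) PySem.Dict.empty
  -- [{j for group in node_to_elems.values() if e in group for j in group} - {e} for e in range(len(coarse_elems))]
  (PySem.List.pyRange 0 (PySem.List.len coarse_elems) 1).map (fun e =>
    PySem.Set.discard
      (node_to_elems.values.foldl (fun s group =>
        if group.contains e then PySem.Set.update s group else s) PySem.Set.empty) e)

-- ===== PRECONDITION & SPEC =====
def Spec_build_coarse_adjacency (coarse_elems : List (List Int)) (out : List (List Int)) : Prop := out = build_coarse_adjacency_alt coarse_elems
instance (coarse_elems : List (List Int)) (out : List (List Int)) : Decidable (Spec_build_coarse_adjacency coarse_elems out) := by unfold Spec_build_coarse_adjacency; infer_instance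

-- ===== CLAIM (what is proved, stated in full; the proofs are below) =====
def Claim_equal_build_coarse_adjacency : Prop := ∀ (coarse_elems : List (List Int)), Dom_build_coarse_adjacency coarse_elems → Spec_build_coarse_adjacency coarse_elems (build_coarse_adjacency coarse_elems)

-- ===== LEMMAS AND PROOFS =====
-- ---- helper definitions and lemmas used only by the proofs ----

def pvOccM (ce : List (List Int)) (n : Int) : List Int :=
  (PySem.List.enumerate ce).flatMap (fun p => (p.2.filter (fun x => x == n)).map (fun _ => p.1))

lemma update_closed {s : PySem.Set Int} {L : List Int} (h : ∀ x ∈ L, x ∈ s) :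
    PySem.Set.update s L = s := by
  rw [PySem.Set.update_eq_append_filter]
  have : (PySem.Set.ofList L).filter (fun y => !(PySem.Set.contains s y)) = [] := by
    apply List.filter_eq_nil_iff.mpr
    intro a ha
    simp [h a ((PySem.Set.mem_ofList L a).mp ha)]
  rw [this, List.append_nil]

lemma update_idem (s : PySem.Set Int) (L : List Int) :
    PySem.Set.update (PySem.Set.update s L) L = PySem.Set.update s L :=
  update_closed (fun x hx => (PySem.Set.mem_update s L x).mpr (Or.inr hx))

lemma occM_range (ce : List (List Int)) (n : Int) :
    ∀ e ∈ pvOccM ce n, 0 ≤ e ∧ e.toNat < ce.length := by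
  intro e he
  rcases List.mem_flatMap.mp he with ⟨p, hp, hx⟩
  rcases (PySem.List.mem_enumerate_iff ce 0 p).mp hp with ⟨k, hk, rfl⟩
  rcases List.mem_map.mp hx with ⟨y, _, hfy⟩
  simp only at hfy
  subst hfy
  constructor
  · simp
  · simpa using hk

lemma foldl_cond_notmem (g : Int → PySem.Set Int → PySem.Set Int) (i : Int) :
    ∀ (M : List Int) (s0 : PySem.Set Int), i ∉ M →
    M.foldl (fun s k => if k = i then g k s else s) s0 = s0 := by
  intro M
  induction M with
  | nil => intro s0 _; rfl
  | cons k M ih =>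
    intro s0 h
    simp only [List.mem_cons, not_or] at h
    rw [List.foldl_cons, if_neg (fun e => h.1 e.symm), ih _ h.2]

lemma foldl_cond_update (L : List Int) (i : Int) :
    ∀ (M : List Int) (s0 : PySem.Set Int),
    M.foldl (fun s k => if k = i then PySem.Set.update s L else s) s0
      = if i ∈ M then PySem.Set.update s0 L else s0 := by
  intro M
  induction M with
  | nil => intro s0; rfl
  | cons k M ih =>
    intro s0
    rw [List.foldl_cons]
    by_cases hk : k = i
    · rw [if_pos hk, ih]
      have hmem : i ∈ k :: M := by rw [hk]; exact List.mem_cons_self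
      rw [if_pos hmem]
      by_cases hm : i ∈ M
      · rw [if_pos hm, update_idem]
      · rw [if_neg hm]
    · rw [if_neg hk, ih]
      by_cases hm : i ∈ M
      · rw [if_pos hm, if_pos (List.mem_cons_of_mem _ hm)]
      · rw [if_neg hm, if_neg (by simp [hm, Ne.symm hk])]

lemma foldl_cond_nodup (g : Int → PySem.Set Int → PySem.Set Int) (i : Int) :
    ∀ (M : List Int) (s0 : PySem.Set Int), M.Nodup →
    M.foldl (fun s k => if k = i then g k s else s) s0
      = if i ∈ M then g i s0 else s0 := by
  intro M
  induction M with
  | nil => intro s0 _; rfl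
  | cons k M ih =>
    intro s0 hnd
    rw [List.foldl_cons]
    by_cases hk : k = i
    · subst hk
      rw [if_pos rfl, if_pos (by simp)]
      exact foldl_cond_notmem g k M _ ((List.nodup_cons.mp hnd).1)
    · rw [if_neg hk, ih _ (List.nodup_cons.mp hnd).2]
      by_cases hm : i ∈ M
      · rw [if_pos hm, if_pos (by simp [hm])]
      · rw [if_neg hm, if_neg (by simp [hm, Ne.symm hk])]

lemma foldl_setAt (g : Int → PySem.Set Int → PySem.Set Int) :
    ∀ (ks : List Int) (adj : List (PySem.Set Int)), (∀ k ∈ ks, 0 ≤ k ∧ k.toNat < adj.length) →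
    ((ks.foldl (fun a e => PySem.List.pySetD a e (g e (PySem.List.pyGetD a e PySem.Set.empty))) adj).length = adj.length ∧
     ∀ (i : Nat), i < adj.length →
      (ks.foldl (fun a e => PySem.List.pySetD a e (g e (PySem.List.pyGetD a e PySem.Set.empty))) adj)[i]?
        = some (ks.foldl (fun s k => if k = (i : Int) then g k s else s) ((adj[i]?).getD PySem.Set.empty))) := by
  intro ks
  induction ks with
  | nil =>
    intro adj _
    refine ⟨rfl, fun i hi => ?_⟩
    simp [List.getElem?_eq_getElem hi]
  | cons k ks ih =>
    intro adj hb
    have h0k : 0 ≤ k := (hb k (by simp)).1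
    have hlt : k.toNat < adj.length := (hb k (by simp)).2
    simp only [List.foldl_cons]
    rw [PySem.List.pySetD_of_nonneg adj _ h0k]
    set v := g k (PySem.List.pyGetD adj k PySem.Set.empty) with hv
    have hlen : (adj.set k.toNat v).length = adj.length := by simp
    have hb' : ∀ k' ∈ ks, 0 ≤ k' ∧ k'.toNat < (adj.set k.toNat v).length := by
      intro k' hk'; rw [hlen]; exact hb k' (by simp [hk'])
    rcases ih (adj.set k.toNat v) hb' with ⟨ihlen, ihget⟩
    refine ⟨by rw [ihlen, hlen], fun i hi => ?_⟩
    rw [ihget i (by rw [hlen]; exact hi)]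
    congr 1
    have hgv : PySem.List.pyGetD adj k PySem.Set.empty = adj[k.toNat] := by
      rw [PySem.List.pyGetD_of_nonneg adj _ h0k, List.getD_eq_getElem?_getD,
        List.getElem?_eq_getElem hlt]
      rfl
    by_cases hk : k = (i : Int)
    · have hki : i = k.toNat := by omega
      subst hki
      rw [if_pos hk, List.getElem?_set, if_pos rfl, if_pos hlt]
      simp only [Option.getD_some]
      rw [hv, hgv, List.getElem?_eq_getElem hlt]
      rfl
    · have hki : ¬ (k.toNat = i) := by omega
      rw [if_neg hk, List.getElem?_set, if_neg hki]

lemma phase2 (vals : List (List Int)) : ∀ (adj : List (PySem.Set Int)),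
    (∀ L ∈ vals, ∀ e ∈ L, 0 ≤ e ∧ e.toNat < adj.length) →
    ((vals.foldl (fun adj elems => elems.foldl (fun adj e =>
        PySem.List.pySetD adj e
          (PySem.Set.update (PySem.List.pyGetD adj e PySem.Set.empty) elems)) adj) adj).length = adj.length ∧
     ∀ (i : Nat), i < adj.length →
      (vals.foldl (fun adj elems => elems.foldl (fun adj e =>
        PySem.List.pySetD adj e
          (PySem.Set.update (PySem.List.pyGetD adj e PySem.Set.empty) elems)) adj) adj)[i]?
        = some (vals.foldl (fun s L => if (i : Int) ∈ L then PySem.Set.update s L else s)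
            ((adj[i]?).getD PySem.Set.empty))) := by
  induction vals with
  | nil =>
    intro adj _
    refine ⟨rfl, fun i hi => ?_⟩
    simp [List.getElem?_eq_getElem hi]
  | cons L vals ih =>
    intro adj hb
    simp only [List.foldl_cons]
    rcases foldl_setAt (fun _ s => PySem.Set.update s L) L adj
      (fun k hk => hb L (by simp) k hk) with ⟨slen, sget⟩
    set adj' := L.foldl (fun adj e =>
        PySem.List.pySetD adj e
          (PySem.Set.update (PySem.List.pyGetD adj e PySem.Set.empty) L)) adj with hadj'
    have hb' : ∀ L' ∈ vals, ∀ e ∈ L', 0 ≤ e ∧ e.toNat < adj'.length := by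
      intro L' hL' e he
      rw [slen]
      exact hb L' (by simp [hL']) e he
    rcases ih adj' hb' with ⟨ihlen, ihget⟩
    refine ⟨by rw [ihlen, slen], fun i hi => ?_⟩
    rw [ihget i (by rw [slen]; exact hi), sget i hi]
    simp only [Option.getD_some]
    rw [foldl_cond_update]

lemma phase3 (adj : List (PySem.Set Int)) :
    ((PySem.List.pyRange 0 (PySem.List.len adj) 1).foldl (fun adj e =>
        PySem.List.pySetD adj e
          (PySem.Set.discard (PySem.List.pyGetD adj e PySem.Set.empty) e)) adj).length = adj.length ∧
    ∀ (i : Nat), i < adj.length →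
      ((PySem.List.pyRange 0 (PySem.List.len adj) 1).foldl (fun adj e =>
        PySem.List.pySetD adj e
          (PySem.Set.discard (PySem.List.pyGetD adj e PySem.Set.empty) e)) adj)[i]?
        = some (PySem.Set.discard ((adj[i]?).getD PySem.Set.empty) (i : Int)) := by
  have hb : ∀ k ∈ PySem.List.pyRange 0 (PySem.List.len adj) 1, 0 ≤ k ∧ k.toNat < adj.length := by
    intro k hk
    rcases PySem.List.mem_pyRange_one.mp hk with ⟨h1, h2⟩
    simp only [PySem.List.len_eq] at h2
    omega
  rcases foldl_setAt (fun e s => PySem.Set.discard s e) _ adj hb with ⟨slen, sget⟩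
  refine ⟨slen, fun i hi => ?_⟩
  rw [sget i hi, foldl_cond_nodup _ _ _ _ (PySem.List.nodup_pyRange_one _ _),
    if_pos (PySem.List.mem_pyRange_one.mpr (by simp [PySem.List.len_eq]; omega))]

lemma pairs_fst (ce : List (List Int)) :
    ((PySem.List.enumerate ce).flatMap (fun p => p.2.map (fun m => (m, p.1)))).map (fun q => q.1)
      = ce.flatMap (fun e => e) := by
  rw [List.map_flatMap]
  have h1 : ∀ p : Int × List Int, (p.2.map (fun m => (m, p.1))).map (fun q => q.1) = p.2 := by
    intro p; simp [Function.comp_def]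
  calc ((PySem.List.enumerate ce).flatMap fun a => ((a.2.map (fun m => (m, a.1))).map fun q => q.1))
      = (PySem.List.enumerate ce).flatMap (fun p => p.2) := List.flatMap_congr (fun p _ => h1 p)
    _ = ((PySem.List.enumerate ce).map (fun p => p.2)).flatten := List.flatMap_def
    _ = ce.flatten := by rw [PySem.List.map_snd_enumerate]
    _ = ce.flatMap (fun e => e) := by rw [List.flatMap_def, List.map_id']

lemma nested_to_flat : ∀ (l : List (Int × List Int)) (d : PySem.Dict Int (List Int)),
    l.foldl (fun d p => p.2.foldl (fun d n => PySem.Dict.modify d n [] (fun v => v ++ [p.1])) d) d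
      = (l.flatMap (fun p => p.2.map (fun m => (m, p.1)))).foldl
          (fun d q => PySem.Dict.modify d q.1 [] (fun v => v ++ [q.2])) d := by
  intro l
  induction l with
  | nil => intro d; rfl
  | cons p l ih =>
    intro d
    rw [List.foldl_cons, List.flatMap_cons, List.foldl_append, ih, List.foldl_map]

lemma dict_values (ce : List (List Int)) :
    ((PySem.List.enumerate ce).foldl (fun d p =>
        p.2.foldl (fun d n => PySem.Dict.modify d n [] (fun l => l ++ [p.1])) d)
        PySem.Dict.empty).values
      = (PySem.List.dedup (ce.flatMap (fun elem => elem))).map (fun n => pvOccM ce n) := by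
  rw [nested_to_flat]
  set pairs := (PySem.List.enumerate ce).flatMap (fun p => p.2.map (fun m => (m, p.1))) with hpairs
  set d := pairs.foldl (fun d q => PySem.Dict.modify d q.1 [] (fun v => v ++ [q.2]))
    PySem.Dict.empty with hd
  have hkeys : d.keys = PySem.List.dedup (ce.flatMap (fun elem => elem)) := by
    rw [hd, PySem.Dict.keys_foldl_modify_key pairs (fun q => q.1) [] (fun _ q => fun v => v ++ [q.2]),
      PySem.Dict.keys_empty, PySem.Set.update_nil_left, pairs_fst]
    simp
  have hnd : d.keys.Nodup := by
    rw [hd]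
    exact PySem.Dict.nodup_keys_foldl_modify_key pairs (fun q => q.1) [] _ _
      (by simp [PySem.Dict.keys_empty])
  rw [PySem.Dict.values_eq_map_keys d hnd [], hkeys]
  apply List.map_congr_left
  intro n _
  rw [hd, PySem.Dict.getD_foldl_modify_append pairs PySem.Dict.empty n]
  unfold pvOccM
  rw [hpairs]
  simp [List.filter_flatMap, List.map_flatMap, List.filter_map, List.map_map, Function.comp_def]

lemma A_char (ce : List (List Int)) :
    (build_coarse_adjacency ce).length = ce.length ∧
    ∀ (i : Nat), i < ce.length →
      (build_coarse_adjacency ce)[i]?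
        = some (PySem.Set.discard
            (((PySem.List.dedup (ce.flatMap (fun elem => elem))).map (fun n => pvOccM ce n)).foldl
              (fun s L => if (i : Int) ∈ L then PySem.Set.update s L else s)
              PySem.Set.empty) (i : Int)) := by
  unfold build_coarse_adjacency
  dsimp only
  rw [dict_values]
  set adj0 : List (PySem.Set Int) :=
    (PySem.List.pyRange 0 (PySem.List.len ce) 1).map (fun _ => PySem.Set.empty) with hadj0
  have hlen0 : adj0.length = ce.length := by
    rw [hadj0, List.length_map, PySem.List.length_pyRange_one]
    simp
  have hget0 : ∀ (i : Nat), i < ce.length → adj0[i]? = some PySem.Set.empty := by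
    intro i hi
    rw [hadj0, List.map_const', List.getElem?_replicate, if_pos (by rw [List.length_map] at hlen0; omega)]
  set vals := (PySem.List.dedup (ce.flatMap (fun elem => elem))).map (fun n => pvOccM ce n) with hvals
  have hb : ∀ L ∈ vals, ∀ e ∈ L, 0 ≤ e ∧ e.toNat < adj0.length := by
    intro L hL e he
    rcases List.mem_map.mp hL with ⟨n, _, rfl⟩
    have := occM_range ce n e he
    omega
  rcases phase2 vals adj0 hb with ⟨len2, get2⟩
  set adj2 := vals.foldl (fun adj elems => elems.foldl (fun adj e =>
      PySem.List.pySetD adj e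
        (PySem.Set.update (PySem.List.pyGetD adj e PySem.Set.empty) elems)) adj) adj0 with hadj2
  rcases phase3 adj2 with ⟨len3, get3⟩
  constructor
  · rw [len3, len2, hlen0]
  · intro i hi
    rw [get3 i (by omega), get2 i (by omega), hget0 i hi]
    simp only [Option.getD_some]

lemma B_char (ce : List (List Int)) :
    build_coarse_adjacency_alt ce
      = (PySem.List.pyRange 0 (PySem.List.len ce) 1).map (fun e =>
          PySem.Set.discard
            (((PySem.List.dedup (ce.flatMap (fun elem => elem))).map (fun n => pvOccM ce n)).foldl
              (fun s L => if e ∈ L then PySem.Set.update s L else s)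
              PySem.Set.empty) e) := by
  unfold build_coarse_adjacency_alt
  dsimp only
  rw [dict_values]
  apply List.map_congr_left
  intro e _
  congr 1
  apply PySem.List.foldl_congr_mem
  intro s L _
  by_cases h : e ∈ L
  · rw [if_pos (by simpa using h), if_pos h]
  · rw [if_neg (by simpa using h), if_neg h]

-- ===== VERDICT (by name: the statement is the Claim_ definition above) =====
theorem build_coarse_adjacency_spec : Claim_equal_build_coarse_adjacency := by
  intro ce _
  unfold Spec_build_coarse_adjacency
  rcases A_char ce with ⟨hlenA, hgetA⟩
  apply List.ext_getElem?
  intro i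
  rw [B_char]
  by_cases hi : i < ce.length
  · rw [hgetA i hi]
    simp only [PySem.List.len_eq]
    rw [PySem.List.getElem?_map_pyRange_zero _ _ _ hi]
  · rw [List.getElem?_eq_none (by omega),
      List.getElem?_eq_none (by rw [List.length_map, PySem.List.length_pyRange_one]; simp; omega)]
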